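-- pv_equiv track=rewrite | github.com/lockettjc1/hvac-insight-pro | app.py | find_consecutive_runs
-- ===== SOURCE A (Python) =====
-- def find_consecutive_runs(bool_series, min_hours, freq_hours=1):
--     """Return list of (start_idx, end_idx) for runs meeting min_hours duration."""
--     min_steps = max(1, int(min_hours / freq_hours))
--     runs = []
--     in_run = False
--     start = None
--     for i, v in enumerate(bool_series):
--         if v and not in_run:
--             in_run = True
--             start = i
--         elif not v and in_run:
--             in_run = False
--             if (i - start) >= min_steps:
--                 runs.append((start, i - 1))
--     if in_run and (len(bool_series) - start) >= min_steps:
--         runs.append((start, len(bool_series) - 1))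
--     return runs
-- ===== SOURCE B (Python) =====
-- def find_consecutive_runs(bool_series, min_hours, freq_hours=1):
--     """Return list of (start_idx, end_idx) for runs meeting min_hours duration."""
--     min_steps = max(1, int(min_hours / freq_hours))
--     n = len(bool_series)
--     starts = [i for i in range(n)
--               if bool_series[i] and (i == 0 or not bool_series[i - 1])]
--     ends = [i for i in range(n)
--             if bool_series[i] and (i == n - 1 or not bool_series[i + 1])]
--     return [(s, e) for s, e in zip(starts, ends) if e - s + 1 >= min_steps]
-- ===== Notes on version B (the rewrite author's own statement) =====
-- stated objective: alternative
-- what changed: Replaces the single-pass in_run/start state machine by boundary detection: two index comprehensions collect rising-edge start indices and falling-edge end indices, which are zipped into runs and filtered by the length threshold.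
import Mathlib
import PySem

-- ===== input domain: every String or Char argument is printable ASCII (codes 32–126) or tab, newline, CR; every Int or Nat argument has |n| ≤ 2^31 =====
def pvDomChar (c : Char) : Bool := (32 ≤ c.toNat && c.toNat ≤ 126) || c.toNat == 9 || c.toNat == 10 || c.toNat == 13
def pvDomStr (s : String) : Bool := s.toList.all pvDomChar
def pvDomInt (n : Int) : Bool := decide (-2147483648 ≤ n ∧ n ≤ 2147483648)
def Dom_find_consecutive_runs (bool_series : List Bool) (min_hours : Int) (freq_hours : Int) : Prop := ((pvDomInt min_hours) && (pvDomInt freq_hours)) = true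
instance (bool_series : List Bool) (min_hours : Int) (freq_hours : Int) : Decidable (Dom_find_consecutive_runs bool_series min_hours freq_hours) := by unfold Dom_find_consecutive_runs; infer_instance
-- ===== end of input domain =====

-- B replaces A's in_run/start state machine by boundary detection: rising-edge start
-- indices and falling-edge end indices collected in two index comprehensions, zipped
-- into runs and filtered by the length threshold (objective: alternative). Return
-- values proved equal whenever freq_hours ≠ 0.

-- min_steps = max(1, int(min_hours / freq_hours)).  Python's float division followed by
-- int() truncates toward zero; for |min_hours|, |freq_hours| ≤ 2^31 (the Dom bound) the
-- float rounding of the quotient can never cross an integer, so this is exactly Int.tdiv.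
def pvMinSteps (min_hours freq_hours : Int) : Int := max 1 (Int.tdiv min_hours freq_hours)

-- ===== PORT A =====
-- the for-loop over enumerate(bool_series); `i` is the enumerate counter, so when the
-- list is exhausted i = len(bool_series) and the post-loop trailing-run check uses it.
-- Python's `start = None` is only ever read while in_run; we carry 0 as its stand-in.
def pvAGo (ms : Int) : List Bool → Int → Bool → Int → List (Int × Int) → List (Int × Int)
  | [], i, in_run, start, runs =>
      if in_run && decide (i - start ≥ ms) then runs ++ [(start, i - 1)] else runs
  | v :: rest, i, in_run, start, runs =>
      if v && !in_run then pvAGo ms rest (i + 1) true i runs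
      else if !v && in_run then
        pvAGo ms rest (i + 1) false start
          (if i - start ≥ ms then runs ++ [(start, i - 1)] else runs)
      else pvAGo ms rest (i + 1) in_run start runs

def find_consecutive_runs (bool_series : List Bool) (min_hours : Int) (freq_hours : Int) : List (Int × Int) :=
  pvAGo (pvMinSteps min_hours freq_hours) bool_series 0 false 0 []

-- ===== PORT B =====
-- the two index comprehensions over range(n) (rising edges / falling edges), then the
-- zip-and-filter comprehension; bool_series[i] with 0 ≤ i < n is List.getD.
def find_consecutive_runs_alt (bool_series : List Bool) (min_hours : Int) (freq_hours : Int) : List (Int × Int) :=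
  let ms := pvMinSteps min_hours freq_hours
  let n := bool_series.length
  let starts := (List.range n).filter
    (fun i => bool_series.getD i false && (i == 0 || !(bool_series.getD (i - 1) false)))
  let ends := (List.range n).filter
    (fun i => bool_series.getD i false && (i == n - 1 || !(bool_series.getD (i + 1) false)))
  ((starts.zip ends).filter (fun p => decide (((p.2 : Nat) : Int) - ((p.1 : Nat) : Int) + 1 ≥ ms))).map
    (fun p => (((p.1 : Nat) : Int), ((p.2 : Nat) : Int)))

-- ===== PRECONDITION & SPEC =====
-- Pre_ excludes only freq_hours = 0, where Python A raises ZeroDivisionError.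
def Pre_find_consecutive_runs (bool_series : List Bool) (min_hours : Int) (freq_hours : Int) : Prop := freq_hours ≠ 0
instance (bool_series : List Bool) (min_hours : Int) (freq_hours : Int) : Decidable (Pre_find_consecutive_runs bool_series min_hours freq_hours) := by unfold Pre_find_consecutive_runs; infer_instance

def pvWitness_find_consecutive_runs : List Bool × Int × Int := ([true, true, false, true], 2, 1)

def Spec_find_consecutive_runs (bool_series : List Bool) (min_hours : Int) (freq_hours : Int) (out : List (Int × Int)) : Prop := out = find_consecutive_runs_alt bool_series min_hours freq_hours
instance (bool_series : List Bool) (min_hours : Int) (freq_hours : Int) (out : List (Int × Int)) : Decidable (Spec_find_consecutive_runs bool_series min_hours freq_hours out) := by unfold Spec_find_consecutive_runs; infer_instance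

-- ===== CLAIM (what is proved, stated in full; the proofs are below) =====
def Claim_equal_find_consecutive_runs : Prop := ∀ (bool_series : List Bool) (min_hours : Int) (freq_hours : Int), Dom_find_consecutive_runs bool_series min_hours freq_hours → Pre_find_consecutive_runs bool_series min_hours freq_hours → Spec_find_consecutive_runs bool_series min_hours freq_hours (find_consecutive_runs bool_series min_hours freq_hours)

-- ===== LEMMAS AND PROOFS =====

def pvStartsP (prev : Bool) (bs : List Bool) : List Nat :=
  (List.range bs.length).filter
    (fun i => bs.getD i false && (if i = 0 then !prev else !(bs.getD (i - 1) false)))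
def pvEnds (bs : List Bool) : List Nat :=
  (List.range bs.length).filter (fun i => bs.getD i false && !(bs.getD (i + 1) false))

theorem pvStartsP_cons (prev v : Bool) (rest : List Bool) :
    pvStartsP prev (v :: rest) =
      (if v && !prev then [0] else []) ++ (pvStartsP v rest).map (· + 1) := by
  unfold pvStartsP
  rw [List.length_cons, List.range_succ_eq_map, List.filter_cons, List.filter_map]
  have hp : ((fun i => (v :: rest).getD i false &&
        (if i = 0 then !prev else !((v :: rest).getD (i - 1) false))) ∘ Nat.succ) =
      (fun i => rest.getD i false && (if i = 0 then !v else !(rest.getD (i - 1) false))) := by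
    funext i
    cases i <;> simp [List.getD]
  rw [hp]
  have hm : List.map Nat.succ = List.map (fun i => i + 1) := by
    funext l; congr 1
  rw [hm]
  by_cases hv : (v && !prev) = true <;> simp [List.getD, hv]

theorem pvEnds_cons (v : Bool) (rest : List Bool) :
    pvEnds (v :: rest) =
      (if v && !(rest.getD 0 false) then [0] else []) ++ (pvEnds rest).map (· + 1) := by
  unfold pvEnds
  rw [List.length_cons, List.range_succ_eq_map, List.filter_cons, List.filter_map]
  have hp : ((fun i => (v :: rest).getD i false && !((v :: rest).getD (i + 1) false)) ∘ Nat.succ) =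
      (fun i => rest.getD i false && !(rest.getD (i + 1) false)) := by
    funext i; simp [List.getD]
  rw [hp]
  have hm : List.map Nat.succ = List.map (fun i => i + 1) := by
    funext l; congr 1
  rw [hm]
  have h0 : ((v :: rest).getD 0 false && !((v :: rest).getD (0 + 1) false)) = (v && !(rest.getD 0 false)) := by
    simp
  rw [h0]
  split_ifs <;> simp

theorem pvStartsP_true (bs : List Bool) :
    pvStartsP true bs = (pvStartsP false (bs.dropWhile id)).map (· + (bs.takeWhile id).length) := by
  induction bs with
  | nil => simp [pvStartsP]
  | cons v rest ih =>
    cases v with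
    | false =>
      rw [pvStartsP_cons]
      simp [List.takeWhile, List.dropWhile, pvStartsP_cons]
    | true =>
      rw [pvStartsP_cons, ih]
      have ht : (true :: rest).takeWhile id = true :: rest.takeWhile id := by
        simp [List.takeWhile]
      have hd : (true :: rest).dropWhile id = rest.dropWhile id := by
        simp [List.dropWhile]
      rw [ht, hd]
      simp [List.map_map, Function.comp_def, Nat.add_assoc]

theorem pvEnds_true (bs : List Bool) (h : bs.headD false = true) :
    pvEnds bs = ((bs.takeWhile id).length - 1) ::
      (pvEnds (bs.dropWhile id)).map (· + (bs.takeWhile id).length) := by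
  induction bs with
  | nil => simp at h
  | cons v rest ih =>
    have hv : v = true := by simpa using h
    subst hv
    rw [pvEnds_cons]
    cases rest with
    | nil => simp [pvEnds, List.takeWhile, List.dropWhile]
    | cons w t =>
      cases w with
      | false => simp [List.getD, List.takeWhile, List.dropWhile]
      | true =>
        have ih' := ih (by simp)
        rw [show ((true :: t).getD 0 false) = true from rfl]
        simp only [Bool.not_true, Bool.and_false]
        rw [if_neg (by simp), List.nil_append, ih']
        have ht : (true :: true :: t).takeWhile id = true :: (true :: t).takeWhile id := by
          simp [List.takeWhile]
        have hd : (true :: true :: t).dropWhile id = (true :: t).dropWhile id := by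
          simp [List.dropWhile]
        rw [ht, hd]
        have hk : 1 ≤ ((true :: t).takeWhile id).length := by
          simp [List.takeWhile]
        simp only [List.map_cons, List.map_map, List.length_cons]
        rw [List.cons.injEq]
        constructor
        · omega
        · simp [Function.comp_def, Nat.add_assoc]

def pvCore (ms : Int) (bs : List Bool) : List (Int × Int) :=
  (((pvStartsP false bs).zip (pvEnds bs)).filter
      (fun p => decide (((p.2 : Nat) : Int) - ((p.1 : Nat) : Int) + 1 ≥ ms))).map
    (fun p => (((p.1 : Nat) : Int), ((p.2 : Nat) : Int)))

def pvShift (d : Int) (l : List (Int × Int)) : List (Int × Int) :=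
  l.map (fun p => (p.1 + d, p.2 + d))

-- shifting every index by a constant k commutes with pvCore's filter-and-cast
theorem pvCore_shift_aux (ms : Int) (S E : List Nat) (k : Nat) :
    (((S.map (· + k)).zip (E.map (· + k))).filter
        (fun p => decide (((p.2 : Nat) : Int) - ((p.1 : Nat) : Int) + 1 ≥ ms))).map
      (fun p => (((p.1 : Nat) : Int), ((p.2 : Nat) : Int))) =
    pvShift k (((S.zip E).filter
        (fun p => decide (((p.2 : Nat) : Int) - ((p.1 : Nat) : Int) + 1 ≥ ms))).map
      (fun p => (((p.1 : Nat) : Int), ((p.2 : Nat) : Int)))) := by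
  rw [List.zip_map, List.filter_map]
  unfold pvShift
  rw [List.map_map, List.map_map]
  have hf : ((fun p : Nat × Nat => decide (((p.2 : Nat) : Int) - ((p.1 : Nat) : Int) + 1 ≥ ms)) ∘
      Prod.map (· + k) (· + k)) =
      (fun p : Nat × Nat => decide (((p.2 : Nat) : Int) - ((p.1 : Nat) : Int) + 1 ≥ ms)) := by
    funext p
    simp only [Function.comp_def, Prod.map]
    rw [decide_eq_decide]
    push_cast
    omega
  rw [hf]
  congr 1

theorem pvCore_false (ms : Int) (rest : List Bool) :
    pvCore ms (false :: rest) = pvShift 1 (pvCore ms rest) := by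
  unfold pvCore
  rw [pvStartsP_cons, pvEnds_cons]
  simp only [Bool.false_and, Bool.false_eq_true, if_false, List.nil_append]
  have := pvCore_shift_aux ms (pvStartsP false rest) (pvEnds rest) 1
  simpa using this

theorem pvCore_true (ms : Int) (rest : List Bool) :
    pvCore ms (true :: rest) =
      (if ((rest.takeWhile id).length + 1 : Int) ≥ ms then
        [(0, ((rest.takeWhile id).length : Int))] else []) ++
      pvShift ((rest.takeWhile id).length + 1) (pvCore ms (rest.dropWhile id)) := by
  unfold pvCore
  rw [pvStartsP_cons, pvEnds_true (true :: rest) (by rfl), pvStartsP_true]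
  have ht : (true :: rest).takeWhile id = true :: rest.takeWhile id := by
    simp [List.takeWhile]
  have hd : (true :: rest).dropWhile id = rest.dropWhile id := by
    simp [List.dropWhile]
  rw [ht, hd]
  simp only [Bool.not_false, Bool.and_true, List.length_cons, Nat.add_sub_cancel]
  rw [if_pos trivial]
  have hmap : List.map (fun x => x + 1)
      (List.map (fun x => x + (rest.takeWhile id).length) (pvStartsP false (rest.dropWhile id))) =
      List.map (fun x => x + ((rest.takeWhile id).length + 1)) (pvStartsP false (rest.dropWhile id)) := by
    rw [List.map_map]
    congr 1
  rw [hmap, List.singleton_append, List.zip_cons_cons, List.filter_cons]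
  have hc : (decide ((((rest.takeWhile id).length : Nat) : Int) - ((0 : Nat) : Int) + 1 ≥ ms)) =
      (decide (((rest.takeWhile id).length + 1 : Int) ≥ ms)) := by
    rw [decide_eq_decide]; push_cast; omega
  rw [hc]
  have haux := pvCore_shift_aux ms (pvStartsP false (rest.dropWhile id))
    (pvEnds (rest.dropWhile id)) ((rest.takeWhile id).length + 1)
  by_cases hms : ((rest.takeWhile id).length + 1 : Int) ≥ ms
  · rw [if_pos (by simpa using hms), if_pos hms]
    simp only [List.map_cons, List.cons_append, List.nil_append]
    rw [List.cons.injEq]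
    refine ⟨by push_cast; ring_nf, ?_⟩
    rw [haux]
    push_cast
    rfl
  · rw [if_neg (by simpa using hms), if_neg hms]
    rw [haux]
    push_cast
    rfl

theorem pvShift_zero (l : List (Int × Int)) : pvShift 0 l = l := by
  simp [pvShift]

theorem pvShift_shift (i d : Int) (l : List (Int × Int)) :
    pvShift i (pvShift d l) = pvShift (i + d) l := by
  simp only [pvShift, List.map_map]
  congr 1
  funext p
  simp only [Function.comp_def, Prod.mk.injEq]
  constructor <;> ring

theorem pvShift_append (i : Int) (l l' : List (Int × Int)) :
    pvShift i (l ++ l') = pvShift i l ++ pvShift i l' := by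
  simp [pvShift]

def pvBGo (ms : Int) : List Bool → Int → List (Int × Int)
  | [], _ => []
  | false :: rest, i => pvBGo ms rest (i + 1)
  | true :: rest, i =>
      let k : Nat := (rest.takeWhile id).length + 1
      (if (k : Int) ≥ ms then [(i, i + (k : Int) - 1)] else []) ++
        pvBGo ms (rest.dropWhile id) (i + (k : Int))
termination_by l _ => l.length
decreasing_by
  · simp
  · have := List.length_dropWhile_le id rest
    simp; omega

theorem pvB_core (ms : Int) : ∀ (n : Nat) (bs : List Bool), bs.length = n →
    ∀ i, pvBGo ms bs i = pvShift i (pvCore ms bs) := by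
  intro n
  induction n using Nat.strong_induction_on with
  | _ n ih =>
    intro bs hn i
    match bs with
    | [] => simp [pvBGo, pvCore, pvStartsP, pvEnds, pvShift]
    | false :: rest =>
      rw [show pvBGo ms (false :: rest) i = pvBGo ms rest (i + 1) by rw [pvBGo],
        ih rest.length (by simp [← hn]) rest rfl (i + 1),
        pvCore_false, pvShift_shift]
    | true :: rest =>
      have hlen : (rest.dropWhile id).length < n := by
        have := List.length_dropWhile_le id rest
        simp at hn; omega
      rw [show pvBGo ms (true :: rest) i =
          (if (((rest.takeWhile id).length + 1 : Nat) : Int) ≥ ms then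
            [(i, i + (((rest.takeWhile id).length + 1 : Nat) : Int) - 1)] else []) ++
          pvBGo ms (rest.dropWhile id) (i + (((rest.takeWhile id).length + 1 : Nat) : Int))
          by rw [pvBGo],
        ih (rest.dropWhile id).length hlen _ rfl, pvCore_true, pvShift_append,
        pvShift_shift]
      congr 1
      · by_cases hms : (((rest.takeWhile id).length + 1 : Nat) : Int) ≥ ms
        · rw [if_pos hms, if_pos (by push_cast at hms ⊢; omega)]
          simp [pvShift]
          ring
        · rw [if_neg hms, if_neg (by push_cast at hms ⊢; omega)]
          simp [pvShift]


theorem pvMain (ms : Int) (bs : List Bool) :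
    (∀ (i s : Int) (runs : List (Int × Int)),
        pvAGo ms bs i false s runs = runs ++ pvBGo ms bs i) ∧
    (∀ (i s : Int) (runs : List (Int × Int)),
        pvAGo ms bs i true s runs =
          (if i + ((bs.takeWhile id).length : Int) - s ≥ ms then
            runs ++ [(s, i + ((bs.takeWhile id).length : Int) - 1)] else runs)
          ++ pvBGo ms (bs.dropWhile id) (i + ((bs.takeWhile id).length : Int))) := by
  induction bs with
  | nil =>
    refine ⟨fun i s runs => by simp [pvAGo, pvBGo], fun i s runs => ?_⟩
    simp [pvAGo, pvBGo]
  | cons v rest ih =>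
    obtain ⟨ihF, ihT⟩ := ih
    constructor
    · intro i s runs
      cases v with
      | false =>
        show pvAGo ms rest (i + 1) false s runs = _
        rw [ihF, show pvBGo ms (false :: rest) i = pvBGo ms rest (i + 1) by rw [pvBGo]]
      | true =>
        show pvAGo ms rest (i + 1) true i runs = _
        rw [ihT]
        rw [show pvBGo ms (true :: rest) i =
          (if (((rest.takeWhile id).length + 1 : Nat) : Int) ≥ ms then
            [(i, i + (((rest.takeWhile id).length + 1 : Nat) : Int) - 1)] else []) ++
          pvBGo ms (rest.dropWhile id) (i + (((rest.takeWhile id).length + 1 : Nat) : Int))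
          by rw [pvBGo]]
        have hc : (i + 1 + ((rest.takeWhile id).length : Int) - i ≥ ms) =
            ((((rest.takeWhile id).length + 1 : Nat) : Int) ≥ ms) := by
          rw [eq_iff_iff]; push_cast; omega
        have he : i + (((rest.takeWhile id).length + 1 : Nat) : Int) =
            i + 1 + ((rest.takeWhile id).length : Int) := by push_cast; ring
        simp only [hc, he]
        split_ifs with h
        · simp only [List.append_assoc, List.singleton_append]
        · simp
    · intro i s runs
      cases v with
      | false =>
        show pvAGo ms rest (i + 1) false s
            (if i - s ≥ ms then runs ++ [(s, i - 1)] else runs) = _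
        rw [ihF]
        have htw : (false :: rest).takeWhile id = ([] : List Bool) := by
          simp [List.takeWhile]
        have hdw : (false :: rest).dropWhile id = false :: rest := by
          simp [List.dropWhile]
        rw [htw, hdw, show pvBGo ms (false :: rest) (i + (([] : List Bool).length : Int)) =
          pvBGo ms rest (i + (([] : List Bool).length : Int) + 1) by rw [pvBGo]]
        simp
      | true =>
        show pvAGo ms rest (i + 1) true s runs = _
        rw [ihT]
        have htw : (true :: rest).takeWhile id = true :: rest.takeWhile id := by
          simp [List.takeWhile]
        have hdw : (true :: rest).dropWhile id = rest.dropWhile id := by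
          simp [List.dropWhile]
        rw [htw, hdw]
        simp only [List.length_cons, Nat.cast_add, Nat.cast_one]
        have hc : (i + 1 + ((rest.takeWhile id).length : Int) - s ≥ ms) =
            (i + (((rest.takeWhile id).length : Int) + 1) - s ≥ ms) := by
          rw [eq_iff_iff]; omega
        have he : i + (((rest.takeWhile id).length : Int) + 1) =
            i + 1 + ((rest.takeWhile id).length : Int) := by ring
        simp only [hc, he]

theorem pvAlt_core (bs : List Bool) (mh fh : Int) :
    find_consecutive_runs_alt bs mh fh = pvCore (pvMinSteps mh fh) bs := by
  unfold find_consecutive_runs_alt pvCore pvStartsP pvEnds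
  dsimp only
  have hs : (List.filter (fun i => bs.getD i false && (i == 0 || !bs.getD (i - 1) false))
        (List.range bs.length)) =
      List.filter (fun i => bs.getD i false && if i = 0 then !false else !(bs.getD (i - 1) false))
        (List.range bs.length) := by
    congr 1
    funext i
    by_cases h : i = 0
    · simp [h]
    · have hb : (i == 0) = false := by simpa using h
      simp [h, hb]
  have hends : (List.filter (fun i => bs.getD i false && (i == bs.length - 1 || !bs.getD (i + 1) false))
        (List.range bs.length)) =
      List.filter (fun i => bs.getD i false && !(bs.getD (i + 1) false)) (List.range bs.length) := by
    apply List.filter_congr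
    intro i hi
    rw [List.mem_range] at hi
    by_cases h : i = bs.length - 1
    · have hgd : bs.getD (i + 1) false = false :=
        List.getD_eq_default _ _ (by omega)
      have hb : (i == bs.length - 1) = true := by simpa using h
      have hgd' : bs[i + 1]?.getD false = false := hgd
      simp [hb, hgd']
    · have hb : (i == bs.length - 1) = false := by simpa using h
      simp [hb]
  rw [hs, hends]

-- ===== VERDICT (by name: the statement is the Claim_ definition above) =====
theorem find_consecutive_runs_spec : Claim_equal_find_consecutive_runs := by
  intro bs mh fh _ _
  unfold Spec_find_consecutive_runs find_consecutive_runs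
  rw [(pvMain (pvMinSteps mh fh) bs).1, pvB_core (pvMinSteps mh fh) bs.length bs rfl 0,
    pvShift_zero, pvAlt_core]
  simp
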